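-- pv_equiv track=rewrite | github.com/juius/tool-toad | tool_toad/thermochemistry.py | get_indices
-- ===== SOURCE A (Python) =====
-- def get_indices(lines, pattern, stop_pattern=None):
--     indices = []
--     for i, l in enumerate(lines):
--         if pattern in l:
--             indices.append(i)
--         if stop_pattern and stop_pattern in l:
--             break
--     return indices
-- ===== SOURCE B (Python) =====
-- def get_indices(lines, pattern, stop_pattern=None):
--     boundary = None
--     if stop_pattern:
--         boundary = next((i for i, l in enumerate(lines) if stop_pattern in l), None)
--     end = len(lines) if boundary is None else boundary + 1
--     return [i for i in range(end) if pattern in lines[i]]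
-- ===== Notes on version B (the rewrite author's own statement) =====
-- stated objective: alternative
-- what changed: Replaces A's single enumerate loop with a break by a two-phase structure: first locate the stop boundary with next() over a generator (respecting the falsy stop_pattern guard), then collect matching indices with a comprehension over range(end).
import Mathlib
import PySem

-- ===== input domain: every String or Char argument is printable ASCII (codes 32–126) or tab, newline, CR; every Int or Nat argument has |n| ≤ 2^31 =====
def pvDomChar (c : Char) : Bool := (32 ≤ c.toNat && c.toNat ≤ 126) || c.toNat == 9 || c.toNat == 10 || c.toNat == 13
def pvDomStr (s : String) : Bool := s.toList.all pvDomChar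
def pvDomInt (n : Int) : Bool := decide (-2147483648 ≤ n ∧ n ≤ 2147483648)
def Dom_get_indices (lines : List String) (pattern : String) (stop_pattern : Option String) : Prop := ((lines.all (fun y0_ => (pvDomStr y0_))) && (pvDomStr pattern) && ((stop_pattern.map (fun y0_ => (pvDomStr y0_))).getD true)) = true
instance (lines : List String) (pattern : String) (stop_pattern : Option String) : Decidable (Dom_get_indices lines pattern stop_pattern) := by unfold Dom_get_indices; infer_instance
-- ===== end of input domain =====

-- B replaces A's single loop-with-break by a two-phase locate-then-filter decomposition
-- (find the stop boundary first, then a comprehension over range(end)); objective: alternative.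

-- ===== PORT A =====
-- 'stop_pattern and stop_pattern in l': truthiness of the optional string, then substring test
def pvStopHit (stop_pattern : Option String) (l : String) : Bool :=
  match stop_pattern with
  | some s => decide (s ≠ "") && PySem.Str.isIn s l
  | none => false

-- the enumerate loop of A: i is the enumerate counter, appended as a Python int
def get_indices_go (pattern : String) (stop_pattern : Option String) : List String → Nat → List Int
  | [], _ => []
  | l :: rest, i =>
    let hd := if PySem.Str.isIn pattern l then [(i : Int)] else []
    if pvStopHit stop_pattern l then hd
    else hd ++ get_indices_go pattern stop_pattern rest (i + 1)

def get_indices (lines : List String) (pattern : String) (stop_pattern : Option String) : List Int :=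
  get_indices_go pattern stop_pattern lines 0

-- ===== PORT B =====
def get_indices_alt (lines : List String) (pattern : String) (stop_pattern : Option String) : List Int :=
  let boundary : Option Nat :=
    match stop_pattern with
    | none => none
    | some s => if s = "" then none else lines.findIdx? (fun l => PySem.Str.isIn s l)
  let stop : Nat := match boundary with | none => lines.length | some b => b + 1
  ((List.range stop).filter (fun i => PySem.Str.isIn pattern (lines.getD i ""))).map
    (fun i => Int.ofNat i)

-- ===== PRECONDITION & SPEC =====
def Spec_get_indices (lines : List String) (pattern : String) (stop_pattern : Option String) (out : List Int) : Prop := out = get_indices_alt lines pattern stop_pattern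
instance (lines : List String) (pattern : String) (stop_pattern : Option String) (out : List Int) : Decidable (Spec_get_indices lines pattern stop_pattern out) := by unfold Spec_get_indices; infer_instance

-- ===== CLAIM (what is proved, stated in full; the proofs are below) =====
def Claim_equal_get_indices : Prop := ∀ (lines : List String) (pattern : String) (stop_pattern : Option String), Dom_get_indices lines pattern stop_pattern → Spec_get_indices lines pattern stop_pattern (get_indices lines pattern stop_pattern)

-- ===== LEMMAS AND PROOFS =====

-- the boundary-derived end index, over an arbitrary stop predicate
def pvEndOf (q : String → Bool) (lines : List String) : Nat :=
  match lines.findIdx? q with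
  | none => lines.length
  | some b => b + 1

lemma get_indices_go_eq (pattern : String) (stop_pattern : Option String) :
    ∀ (lines : List String) (i : Nat),
      get_indices_go pattern stop_pattern lines i =
        ((List.range (pvEndOf (pvStopHit stop_pattern) lines)).filter
            (fun k => PySem.Str.isIn pattern (lines.getD k ""))).map
          (fun k => ((i + k : Nat) : Int)) := by
  intro lines
  induction lines with
  | nil => intro i; simp [get_indices_go, pvEndOf]
  | cons l rest ih =>
    intro i
    by_cases hq : pvStopHit stop_pattern l
    · have hfind : (l :: rest).findIdx? (pvStopHit stop_pattern) = some 0 := by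
        simp [List.findIdx?_cons, hq]
      by_cases hp : PySem.Chars.isIn pattern.toList l.toList <;>
        simp [get_indices_go, hq, hp, pvEndOf, hfind, List.range_succ, List.filter,
          PySem.Str.isIn]
    · have hfind : (l :: rest).findIdx? (pvStopHit stop_pattern) =
          (rest.findIdx? (pvStopHit stop_pattern)).map (· + 1) := by
        simp [List.findIdx?_cons, hq]
      have hend : pvEndOf (pvStopHit stop_pattern) (l :: rest) =
          pvEndOf (pvStopHit stop_pattern) rest + 1 := by
        unfold pvEndOf
        rw [hfind]
        cases rest.findIdx? (pvStopHit stop_pattern) <;> simp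
      have hmap : ∀ F : List Nat,
          (F.map Nat.succ).map (fun k => ((i + k : Nat) : Int)) =
            F.map (fun k => (((i + 1) + k : Nat) : Int)) := by
        intro F
        rw [List.map_map]
        exact List.map_congr_left (fun k _ => by simp only [Function.comp]; push_cast; ring)
      rw [hend, List.range_succ_eq_map]
      by_cases hp : PySem.Chars.isIn pattern.toList l.toList <;>
        · simp [get_indices_go, hq, hp, PySem.Str.isIn,
            List.filter_map, Function.comp_def, ih]
          intros; omega

lemma findIdx?_false (lines : List String) (q : String → Bool) (h : ∀ l, q l = false) :
    lines.findIdx? q = none := by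
  induction lines with
  | nil => simp
  | cons l rest ih => simp [List.findIdx?_cons, h, ih]

-- ===== VERDICT (by name: the statement is the Claim_ definition above) =====
theorem get_indices_spec : Claim_equal_get_indices := by
  intro lines pattern stop_pattern hdom
  clear hdom
  unfold Spec_get_indices get_indices get_indices_alt
  rw [get_indices_go_eq]
  have hb :
      (match stop_pattern with
        | none => none
        | some s => if s = "" then none else lines.findIdx? (fun l => PySem.Str.isIn s l)) =
        lines.findIdx? (pvStopHit stop_pattern) := by
    cases stop_pattern with
    | none => exact (findIdx?_false lines _ (fun l => rfl)).symm
    | some s =>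
      by_cases hs : s = ""
      · simp only [hs, if_pos]
        exact (findIdx?_false lines _ (by intro l; simp [pvStopHit])).symm
      · simp only [if_neg hs]
        congr 1
        funext l
        simp [pvStopHit, hs]
  rw [hb]
  simp only [pvEndOf]
  simp
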